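-- pv_equiv track=rewrite | github.com/TUM-DAML/ibmb | dataloaders/IBMBNodeLoader.py | prime_post_process
-- ===== SOURCE A (Python) =====
-- from heapq import heappush, heappop, heapify
--
-- def prime_post_process(loader, merge_max_size):
--     h = [(len(p), p,) for p in loader]
--     heapify(h)
--
--     while len(h) > 1:
--         len1, p1 = heappop(h)
--         len2, p2 = heappop(h)
--         if len1 + len2 <= merge_max_size:
--             heappush(h, (len1 + len2, p1 + p2))
--         else:
--             heappush(h, (len1, p1,))
--             heappush(h, (len2, p2,))
--             break
--
--     new_batch = []
--
--     while len(h):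
--         _, p = heappop(h)
--         new_batch.append(p)
--
--     return new_batch
-- ===== SOURCE B (Python) =====
-- def prime_post_process(loader, merge_max_size):
--     # keep a single ascending-sorted list of (len, partition) tuples instead of a heap
--     items = sorted((len(p), p) for p in loader)
--     while len(items) > 1:
--         l1, p1 = items[0]
--         l2, p2 = items[1]
--         if l1 + l2 > merge_max_size:
--             break
--         items = items[2:]
--         _ins((l1 + l2, p1 + p2), items)
--     return [p for _, p in items]
--
--
-- def _ins(item, s):
--     # insert item into the sorted list s, after any equal elements
--     for i, x in enumerate(s):
--         if item < x:
--             s.insert(i, item)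
--             return
--     s.append(item)
-- ===== Notes on version B (the rewrite author's own statement) =====
-- stated objective: simpler
-- what changed: Replaces the binary heap with a single list kept in ascending sorted order: sort once, repeatedly take the first two elements and insert the merged tuple back in order, then read the result off directly.
import Mathlib
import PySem

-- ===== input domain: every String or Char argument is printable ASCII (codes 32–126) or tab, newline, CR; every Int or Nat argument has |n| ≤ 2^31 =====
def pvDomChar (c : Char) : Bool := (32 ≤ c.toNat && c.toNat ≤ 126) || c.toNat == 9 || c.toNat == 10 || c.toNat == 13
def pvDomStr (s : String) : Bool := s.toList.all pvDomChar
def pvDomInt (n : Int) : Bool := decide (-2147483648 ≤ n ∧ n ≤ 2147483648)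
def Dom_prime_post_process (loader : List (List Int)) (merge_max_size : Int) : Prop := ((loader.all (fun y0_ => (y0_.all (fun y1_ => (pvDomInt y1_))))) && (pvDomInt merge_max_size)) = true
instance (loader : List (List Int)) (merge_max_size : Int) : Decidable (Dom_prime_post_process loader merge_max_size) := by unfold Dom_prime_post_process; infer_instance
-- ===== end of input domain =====

-- B replaces A's binary heap by one list kept in ascending sorted order (sort once,
-- merge the first two, ordered re-insertion); objective: simpler. (A mutates nothing observable.)


-- ===== PORT A =====
-- Python tuple comparison (len, p) < (len', p'): lexicographic on the pair, with
-- Python's lexicographic list comparison on the second component — exactly Lean's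
-- lexicographic order toLex on Int × List Int (Mathlib's List order is Python's).
def pvLt (a b : Int × List Int) : Bool := decide (toLex a < toLex b)

-- heappop, ported by its value contract: the heap is modelled by its content list and
-- pvPopMin removes one minimal element (under this total order minimal elements are
-- equal as values, so the returned value is exactly what heappop returns; heappush is
-- consing onto the content list). Exact at the level of values, which is all A observes.
def pvPopMin : List (Int × List Int) → Option ((Int × List Int) × List (Int × List Int))
  | [] => none
  | x :: xs =>
    match pvPopMin xs with
    | none => some (x, [])
    | some (m, r) => if pvLt m x then some (m, x :: r) else some (x, xs)

theorem pvPopMin_eq_none_iff {l : List (Int × List Int)} : pvPopMin l = none ↔ l = [] := by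
  cases l with
  | nil => simp [pvPopMin]
  | cons x xs =>
    simp only [pvPopMin]
    cases h : pvPopMin xs with
    | none => simp
    | some p =>
      obtain ⟨m, r⟩ := p
      by_cases hlt : pvLt m x = true <;> simp [hlt]

theorem pvPopMin_length : ∀ {l : List (Int × List Int)} {m r},
    pvPopMin l = some (m, r) → r.length + 1 = l.length := by
  intro l
  induction l with
  | nil => intro m r h; simp [pvPopMin] at h
  | cons x xs ih =>
    intro m r h
    simp only [pvPopMin] at h
    cases hx : pvPopMin xs with
    | none =>
      rw [hx] at h
      have hxs : xs = [] := pvPopMin_eq_none_iff.mp hx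
      subst hxs
      simp at h
      simp [← h.2]
    | some p =>
      obtain ⟨pm, pr⟩ := p
      rw [hx] at h
      by_cases hlt : pvLt pm x = true
      · simp only [hlt, if_true] at h
        obtain ⟨rfl, rfl⟩ : pm = m ∧ x :: pr = r := by simpa using h
        have := ih (m := pm) (r := pr) hx
        simp; omega
      · simp only [hlt] at h
        obtain ⟨rfl, rfl⟩ : x = m ∧ xs = r := by simpa using h
        rfl

-- A's while-loop: pop the two smallest; merge and continue, or push both back and stop.
def pvALoop (h : List (Int × List Int)) (cap : Int) : List (Int × List Int) :=
  match h1 : pvPopMin h with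
  | none => h
  | some (m1, r1) =>
    match h2 : pvPopMin r1 with
    | none => h
    | some (m2, r2) =>
      if m1.1 + m2.1 ≤ cap then pvALoop ((m1.1 + m2.1, m1.2 ++ m2.2) :: r2) cap
      else m1 :: m2 :: r2
termination_by h.length
decreasing_by
  have e1 := pvPopMin_length h1
  have e2 := pvPopMin_length h2
  simp; omega

-- A's drain loop: pop everything, keeping the partitions.
def pvDrain (h : List (Int × List Int)) : List (List Int) :=
  match hm : pvPopMin h with
  | none => []
  | some (m, r) => m.2 :: pvDrain r
termination_by h.length
decreasing_by
  have := pvPopMin_length hm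
  omega

def prime_post_process (loader : List (List Int)) (merge_max_size : Int) : List (List Int) :=
  pvDrain (pvALoop (loader.map (fun p => ((p.length : Int), p))) merge_max_size)

-- ===== PORT B =====
-- Source B's _ins: insert into a sorted list, after any equal elements.
def pvIns (it : Int × List Int) : List (Int × List Int) → List (Int × List Int)
  | [] => [it]
  | x :: xs => if pvLt it x then it :: x :: xs else x :: pvIns it xs

theorem pvIns_length (it : Int × List Int) : ∀ (l : List (Int × List Int)),
    (pvIns it l).length = l.length + 1 := by
  intro l
  induction l with
  | nil => simp [pvIns]
  | cons a as ih => simp only [pvIns]; split <;> simp [ih]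

-- Source B's while-loop over the sorted list.
def pvBLoop (s : List (Int × List Int)) (cap : Int) : List (Int × List Int) :=
  match s with
  | x :: y :: t =>
    if x.1 + y.1 > cap then x :: y :: t
    else pvBLoop (pvIns (x.1 + y.1, x.2 ++ y.2) t) cap
  | s' => s'
termination_by s.length
decreasing_by simp [pvIns_length]

def prime_post_process_alt (loader : List (List Int)) (merge_max_size : Int) : List (List Int) :=
  (pvBLoop (PySem.List.sorted (loader.map (fun p => ((p.length : Int), p)))
      (fun x => toLex x) false) merge_max_size).map Prod.snd

-- ===== PRECONDITION & SPEC =====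
def Spec_prime_post_process (loader : List (List Int)) (merge_max_size : Int) (out : List (List Int)) : Prop := out = prime_post_process_alt loader merge_max_size
instance (loader : List (List Int)) (merge_max_size : Int) (out : List (List Int)) : Decidable (Spec_prime_post_process loader merge_max_size out) := by unfold Spec_prime_post_process; infer_instance

-- ===== CLAIM (what is proved, stated in full; the proofs are below) =====
def Claim_equal_prime_post_process : Prop := ∀ (loader : List (List Int)) (merge_max_size : Int), Dom_prime_post_process loader merge_max_size → Spec_prime_post_process loader merge_max_size (prime_post_process loader merge_max_size)

-- ===== LEMMAS AND PROOFS =====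

theorem pvLt_iff (a b : Int × List Int) : pvLt a b = true ↔ toLex a < toLex b := by
  simp [pvLt]

theorem pvLt_false_iff (a b : Int × List Int) : pvLt a b = false ↔ toLex b ≤ toLex a := by
  simp [pvLt, not_lt]

theorem pvPopMin_perm : ∀ {l : List (Int × List Int)} {m r},
    pvPopMin l = some (m, r) → l.Perm (m :: r) := by
  intro l
  induction l with
  | nil => intro m r h; simp [pvPopMin] at h
  | cons x xs ih =>
    intro m r h
    simp only [pvPopMin] at h
    cases hx : pvPopMin xs with
    | none =>
      rw [hx] at h
      have hxs : xs = [] := pvPopMin_eq_none_iff.mp hx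
      subst hxs
      simp at h
      simp [h.1, ← h.2]
    | some p =>
      obtain ⟨pm, pr⟩ := p
      rw [hx] at h
      by_cases hlt : pvLt pm x = true
      · simp only [hlt, if_true] at h
        obtain ⟨rfl, rfl⟩ : pm = m ∧ x :: pr = r := by simpa using h
        have hperm := ih (m := pm) (r := pr) hx
        exact (hperm.cons x).trans (List.Perm.swap _ _ _)
      · simp only [hlt] at h
        obtain ⟨rfl, rfl⟩ : x = m ∧ xs = r := by simpa using h
        exact List.Perm.refl _

theorem pvPopMin_min : ∀ {l : List (Int × List Int)} {m r},
    pvPopMin l = some (m, r) → ∀ y ∈ l, toLex m ≤ toLex y := by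
  intro l
  induction l with
  | nil => intro m r h; simp [pvPopMin] at h
  | cons x xs ih =>
    intro m r h y hy
    simp only [pvPopMin] at h
    cases hx : pvPopMin xs with
    | none =>
      rw [hx] at h
      have hxs : xs = [] := pvPopMin_eq_none_iff.mp hx
      subst hxs
      simp at h hy
      simp [h.1, hy]
    | some p =>
      obtain ⟨pm, pr⟩ := p
      rw [hx] at h
      have hmin := ih (m := pm) (r := pr) hx
      by_cases hlt : pvLt pm x = true
      · simp only [hlt, if_true] at h
        obtain ⟨rfl, -⟩ : pm = m ∧ x :: pr = r := by simpa using h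
        rcases List.mem_cons.mp hy with hyx | hyxs
        · subst hyx
          exact le_of_lt ((pvLt_iff _ _).mp hlt)
        · exact hmin y hyxs
      · simp only [hlt] at h
        obtain ⟨rfl, -⟩ : x = m ∧ xs = r := by simpa using h
        have hxle : toLex x ≤ toLex pm :=
          (pvLt_false_iff _ _).mp (eq_false_of_ne_true hlt)
        rcases List.mem_cons.mp hy with hyx | hyxs
        · subst hyx; exact le_refl _
        · exact hxle.trans (hmin y hyxs)

-- the order predicate a sorted state satisfies
def pvSle (a b : Int × List Int) : Prop := toLex a ≤ toLex b

-- popping from any permutation of a sorted nonempty list gives its head and (a permutation of) its tail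
theorem pvPopMin_of_perm_sorted {l : List (Int × List Int)} {a : Int × List Int} {t : List (Int × List Int)}
    (hs : (a :: t).Pairwise pvSle) (hp : l.Perm (a :: t)) :
    ∃ r, pvPopMin l = some (a, r) ∧ r.Perm t := by
  have hne : l ≠ [] := by
    intro h; subst h; exact absurd hp.symm.eq_nil (by simp)
  obtain ⟨p, hl⟩ : ∃ p, pvPopMin l = some p := by
    cases hml : pvPopMin l with
    | none => exact absurd (pvPopMin_eq_none_iff.mp hml) hne
    | some p => exact ⟨p, rfl⟩
  obtain ⟨m, r⟩ := p
  · have hperm := pvPopMin_perm hl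
    have hmin := pvPopMin_min hl
    have hma : m = a := by
      have hm_mem : m ∈ a :: t := hp.mem_iff.mp (hperm.symm.mem_iff.mp (by simp))
      have ha_mem : a ∈ l := hp.mem_iff.mpr (by simp)
      have h1 : toLex m ≤ toLex a := hmin a ha_mem
      have h2 : toLex a ≤ toLex m := by
        rcases List.mem_cons.mp hm_mem with hh | hh
        · simp [hh]
        · exact (List.pairwise_cons.mp hs).1 m hh
      exact toLex.injective (le_antisymm h1 h2)
    subst hma
    refine ⟨r, hl, ?_⟩
    exact (hperm.symm.trans hp).cons_inv

theorem pvSle_trans {a b c : Int × List Int} : pvSle a b → pvSle b c → pvSle a c := le_trans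

theorem pvIns_perm (it : Int × List Int) : ∀ (s : List (Int × List Int)), (pvIns it s).Perm (it :: s) := by
  intro s
  induction s with
  | nil => simp [pvIns]
  | cons x xs ih =>
    simp only [pvIns]
    split
    · exact List.Perm.refl _
    · exact (ih.cons x).trans (List.Perm.swap _ _ _)

theorem pvIns_pairwise (it : Int × List Int) : ∀ {s : List (Int × List Int)},
    s.Pairwise pvSle → (pvIns it s).Pairwise pvSle := by
  intro s
  induction s with
  | nil => intro _; simp [pvIns]
  | cons x xs ih =>
    intro hs
    obtain ⟨hx, hxs⟩ := List.pairwise_cons.mp hs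
    simp only [pvIns]
    split
    · rename_i hlt
      refine List.pairwise_cons.mpr ⟨?_, hs⟩
      intro y hy
      have hitx : pvSle it x := le_of_lt ((pvLt_iff _ _).mp hlt)
      rcases List.mem_cons.mp hy with hh | hh
      · rw [hh]; exact hitx
      · exact pvSle_trans hitx (hx y hh)
    · rename_i hlt
      have hxit : pvSle x it :=
        (pvLt_false_iff _ _).mp (eq_false_of_ne_true hlt)
      refine List.pairwise_cons.mpr ⟨?_, ih hxs⟩
      intro y hy
      rcases List.mem_cons.mp ((pvIns_perm it xs).mem_iff.mp hy) with hh | hh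
      · rw [hh]; exact hxit
      · exact hx y hh

-- A's drain of any permutation of a sorted list is that list's partitions in order
theorem pvDrain_eq_map_snd : ∀ (s l : List (Int × List Int)),
    s.Pairwise pvSle → l.Perm s → pvDrain l = s.map Prod.snd := by
  intro s
  induction s with
  | nil =>
    intro l _ hp
    have : l = [] := hp.eq_nil
    subst this
    rw [pvDrain]
    split
    · rfl
    · rename_i m r heq
      simp [pvPopMin] at heq
  | cons a t ih =>
    intro l hs hp
    obtain ⟨r, hpop, hr⟩ := pvPopMin_of_perm_sorted hs hp
    rw [pvDrain]
    split
    · rename_i heq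
      rw [hpop] at heq; cases heq
    · rename_i m r' heq
      obtain ⟨rfl, rfl⟩ : m = a ∧ r' = r := by
        have h2 := heq.symm.trans hpop
        simpa using h2
      simp [ih r' (List.pairwise_cons.mp hs).2 hr]

theorem pvALoop_nil (cap : Int) : pvALoop [] cap = [] := by
  rw [pvALoop]
  split
  · rfl
  · rename_i m1 r1 heq
    simp [pvPopMin] at heq

theorem pvALoop_singleton (x : Int × List Int) (cap : Int) : pvALoop [x] cap = [x] := by
  rw [pvALoop]
  split
  · rfl
  · rename_i m1 r1 heq
    have : m1 = x ∧ r1 = ([] : List (Int × List Int)) := by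
      simpa [pvPopMin] using heq.symm
    obtain ⟨rfl, rfl⟩ := this
    split
    · rfl
    · rename_i m2 r2 heq2
      simp [pvPopMin] at heq2

theorem pvBLoop_nil (cap : Int) : pvBLoop [] cap = [] := by
  rw [pvBLoop] <;> intros <;> simp_all

theorem pvBLoop_singleton (x : Int × List Int) (cap : Int) : pvBLoop [x] cap = [x] := by
  rw [pvBLoop] <;> intros <;> simp_all

-- loop equivalence: A's loop on any permutation of B's sorted state returns a
-- permutation of B's loop result, which stays sorted
theorem pvLoop_perm : ∀ (n : Nat) (l s : List (Int × List Int)) (cap : Int),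
    l.length ≤ n → s.Pairwise pvSle → l.Perm s →
    (pvBLoop s cap).Pairwise pvSle ∧ (pvALoop l cap).Perm (pvBLoop s cap) := by
  intro n
  induction n with
  | zero =>
    intro l s cap hn hs hp
    have hl : l = [] := by cases l <;> simp_all
    subst hl
    have hsnil : s = [] := hp.symm.eq_nil
    subst hsnil
    rw [pvBLoop_nil, pvALoop_nil]
    exact ⟨List.Pairwise.nil, List.Perm.refl _⟩
  | succ n ih =>
    intro l s cap hn hs hp
    rcases s with _ | ⟨x, _ | ⟨y, t⟩⟩
    · have hl : l = [] := hp.eq_nil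
      subst hl
      rw [pvBLoop_nil, pvALoop_nil]
      exact ⟨List.Pairwise.nil, List.Perm.refl _⟩
    · have hl : l = [x] := List.perm_singleton.mp hp
      subst hl
      rw [pvBLoop_singleton, pvALoop_singleton]
      exact ⟨hs, List.Perm.refl _⟩
    · obtain ⟨r1, hpop1, hr1⟩ := pvPopMin_of_perm_sorted hs hp
      obtain ⟨r2, hpop2, hr2⟩ :=
        pvPopMin_of_perm_sorted (List.pairwise_cons.mp hs).2 hr1
      have hstep : pvALoop l cap =
          if x.1 + y.1 ≤ cap then pvALoop ((x.1 + y.1, x.2 ++ y.2) :: r2) cap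
          else x :: y :: r2 := by
        rw [pvALoop]
        split
        · rename_i heq; rw [hpop1] at heq; cases heq
        · rename_i m1 r1' heq
          obtain ⟨rfl, rfl⟩ : m1 = x ∧ r1' = r1 := by
            have h2 := heq.symm.trans hpop1; simpa using h2
          split
          · rename_i heq2; rw [hpop2] at heq2; cases heq2
          · rename_i m2 r2' heq2
            obtain ⟨rfl, rfl⟩ : m2 = y ∧ r2' = r2 := by
              have h2 := heq2.symm.trans hpop2; simpa using h2
            rfl
      rw [hstep, pvBLoop]
      by_cases hc : x.1 + y.1 ≤ cap
      · rw [if_pos hc, if_neg (not_lt.mpr hc)]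
        have ht : t.Pairwise pvSle := (List.pairwise_cons.mp (List.pairwise_cons.mp hs).2).2
        have hsort' : (pvIns (x.1 + y.1, x.2 ++ y.2) t).Pairwise pvSle :=
          pvIns_pairwise _ ht
        have hperm' : ((x.1 + y.1, x.2 ++ y.2) :: r2).Perm (pvIns (x.1 + y.1, x.2 ++ y.2) t) :=
          (hr2.cons _).trans (pvIns_perm _ t).symm
        have hlen1 := pvPopMin_length hpop1
        have hlen2 := pvPopMin_length hpop2
        exact ih ((x.1 + y.1, x.2 ++ y.2) :: r2) _ cap (by simp; omega) hsort' hperm'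
      · rw [if_neg hc, if_pos (not_le.mp hc)]
        exact ⟨hs, (hr2.cons y).cons x⟩

-- ===== VERDICT (by name: the statement is the Claim_ definition above) =====
theorem prime_post_process_spec : Claim_equal_prime_post_process := by
  intro loader cap _
  unfold Spec_prime_post_process prime_post_process prime_post_process_alt
  set l := loader.map (fun p => ((p.length : Int), p)) with hl
  set s := PySem.List.sorted l (fun x => toLex x) false with hsdef
  have hs : s.Pairwise pvSle :=
    (PySem.List.sorted_pairwise (xs := l) (key := fun x => toLex x)).imp (fun h => h)
  have hp : l.Perm s :=
    (PySem.List.sorted_perm (xs := l) (key := fun x => toLex x) (rev := false)).symm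
  obtain ⟨hsort, hperm⟩ := pvLoop_perm l.length l s cap le_rfl hs hp
  exact pvDrain_eq_map_snd _ _ hsort hperm
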